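-- pv_equiv track=rewrite | github.com/Parady12/homework_8_collab | exercise-3.py | remove_all_after
-- ===== SOURCE A (Python) =====
-- def remove_all_after(numbers, n):
--     ...
--     result = []
--     for item in numbers:
--         result.append(item)
--         if item == n:
--             break
--     return result
-- ===== SOURCE B (Python) =====
-- def remove_all_after(numbers, n):
--     if n in numbers:
--         return list(numbers[:numbers.index(n) + 1])
--     return list(numbers)
-- ===== Notes on version B (the rewrite author's own statement) =====
-- stated objective: idiomatic
-- what changed: Replaces the element-by-element append-and-break loop by a membership test plus index lookup and a single slice copy.
import Mathlib
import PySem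

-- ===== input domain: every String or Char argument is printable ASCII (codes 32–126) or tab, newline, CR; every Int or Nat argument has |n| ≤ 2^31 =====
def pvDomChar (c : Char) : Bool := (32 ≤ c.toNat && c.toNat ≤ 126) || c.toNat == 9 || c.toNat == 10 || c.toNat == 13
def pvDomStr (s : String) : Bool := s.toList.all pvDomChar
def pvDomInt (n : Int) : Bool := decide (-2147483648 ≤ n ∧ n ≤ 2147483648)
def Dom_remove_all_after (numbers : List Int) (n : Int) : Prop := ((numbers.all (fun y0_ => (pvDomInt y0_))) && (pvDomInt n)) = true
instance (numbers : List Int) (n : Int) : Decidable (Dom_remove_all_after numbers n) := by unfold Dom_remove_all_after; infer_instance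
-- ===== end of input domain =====

-- B replaces A's append-and-break loop with a membership test, index lookup and one slice copy (idiomatic).


-- ===== PORT A =====
-- the loop: result starts empty, each item is appended, break on item == n
def removeAllAfterLoop (n : Int) (result : List Int) : List Int → List Int
  | [] => result
  | item :: rest =>
      let result' := result ++ [item]
      if item = n then result' else removeAllAfterLoop n result' rest

def remove_all_after (numbers : List Int) (n : Int) : List Int :=
  removeAllAfterLoop n [] numbers

-- ===== PORT B =====
def remove_all_after_alt (numbers : List Int) (n : Int) : List Int :=
  if numbers.contains n then
    PySem.List.slice numbers none (some (((PySem.List.index? numbers n).getD 0 : Nat) + 1))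
  else
    numbers

-- ===== PRECONDITION & SPEC =====
def Spec_remove_all_after (numbers : List Int) (n : Int) (out : List Int) : Prop := out = remove_all_after_alt numbers n
instance (numbers : List Int) (n : Int) (out : List Int) : Decidable (Spec_remove_all_after numbers n out) := by unfold Spec_remove_all_after; infer_instance

-- ===== CLAIM (what is proved, stated in full; the proofs are below) =====
def Claim_equal_remove_all_after : Prop := ∀ (numbers : List Int) (n : Int), Dom_remove_all_after numbers n → Spec_remove_all_after numbers n (remove_all_after numbers n)

-- ===== LEMMAS AND PROOFS =====

theorem alt_nil (n : Int) : remove_all_after_alt [] n = [] := by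
  simp [remove_all_after_alt]

theorem alt_cons_self (x : Int) (xs : List Int) :
    remove_all_after_alt (x :: xs) x = [x] := by
  unfold remove_all_after_alt
  rw [PySem.List.index?_cons_self, if_pos (by simp)]
  rw [show (((Option.getD (some 0) 0 : Nat) : Int) + 1) = ((1 : Nat) : Int) by norm_num]
  rw [PySem.List.slice_to_natCast]
  simp

theorem alt_cons_ne (x n : Int) (xs : List Int) (h : x ≠ n) :
    remove_all_after_alt (x :: xs) n = x :: remove_all_after_alt xs n := by
  by_cases hm : n ∈ xs
  · have hs : (PySem.List.index? xs n).isSome := by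
      rw [PySem.List.index?_isSome_iff]; exact hm
    obtain ⟨i, hi⟩ := Option.isSome_iff_exists.mp hs
    unfold remove_all_after_alt
    rw [PySem.List.index?_cons_of_ne xs h, hi]
    rw [if_pos (by simp [hm]), if_pos (by simpa using hm)]
    simp only [Option.map_some, Option.getD_some]
    rw [show (((i + 1 : Nat) : Int) + 1) = ((i + 2 : Nat) : Int) by push_cast; ring]
    rw [show (((i : Nat) : Int) + 1) = ((i + 1 : Nat) : Int) by push_cast; ring]
    rw [PySem.List.slice_to_natCast, PySem.List.slice_to_natCast]
    rw [show i + 2 = (i + 1) + 1 by omega]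
    rw [List.take_succ_cons]
  · have hnc : ¬ n ∈ (x :: xs) := by
      intro hc
      rcases List.mem_cons.mp hc with h1 | h2
      · exact h h1.symm
      · exact hm h2
    simp [remove_all_after_alt, hm, hnc]

theorem loop_eq (n : Int) (xs : List Int) :
    ∀ acc, removeAllAfterLoop n acc xs = acc ++ remove_all_after_alt xs n := by
  induction xs with
  | nil => intro acc; simp [removeAllAfterLoop, alt_nil]
  | cons x rest ih =>
      intro acc
      by_cases hx : x = n
      · subst hx
        simp [removeAllAfterLoop, alt_cons_self]
      · rw [alt_cons_ne _ _ _ hx]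
        simp only [removeAllAfterLoop, if_neg hx]
        rw [ih]
        simp

-- ===== VERDICT (by name: the statement is the Claim_ definition above) =====
theorem remove_all_after_spec : Claim_equal_remove_all_after := by
  intro numbers n _
  unfold Spec_remove_all_after remove_all_after
  rw [loop_eq]
  simp
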